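-- pv_equiv track=rewrite | github.com/miseop25/Back_Jun_Code_Study | Programmers/기타문제/퍼즐조각채우기/puzzle_ver1.py | moveToZero
-- ===== SOURCE A (Python) =====
-- def moveToZero(arr) :
--     result = []
--     leftArr = sorted(arr, key = lambda x : x[0])
--     topArr = sorted(arr, key = lambda x: x[1])
--
--     left = leftArr[0][0]
--     top = topArr[0][1]
--
--     for x,y in arr :
--         result.append((x-left, y - top))
--
--     return sorted(result)
-- ===== SOURCE B (Python) =====
-- def moveToZero(arr):
--     left = arr[0][0]
--     top = arr[0][1]
--     for x, y in arr:
--         if x < left: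
--             left = x
--         if y < top:
--             top = y
--     return sorted((x - left, y - top) for x, y in arr)
-- ===== Notes on version B (the rewrite author's own statement) =====
-- stated objective: simpler
-- what changed: B finds the minimum x and y with one linear scan instead of sorting the whole list twice just to read off the first element of each sort.
-- outside the precondition, e.g. on moveToZero([]): A raises IndexError, B raises IndexError
import Mathlib
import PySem

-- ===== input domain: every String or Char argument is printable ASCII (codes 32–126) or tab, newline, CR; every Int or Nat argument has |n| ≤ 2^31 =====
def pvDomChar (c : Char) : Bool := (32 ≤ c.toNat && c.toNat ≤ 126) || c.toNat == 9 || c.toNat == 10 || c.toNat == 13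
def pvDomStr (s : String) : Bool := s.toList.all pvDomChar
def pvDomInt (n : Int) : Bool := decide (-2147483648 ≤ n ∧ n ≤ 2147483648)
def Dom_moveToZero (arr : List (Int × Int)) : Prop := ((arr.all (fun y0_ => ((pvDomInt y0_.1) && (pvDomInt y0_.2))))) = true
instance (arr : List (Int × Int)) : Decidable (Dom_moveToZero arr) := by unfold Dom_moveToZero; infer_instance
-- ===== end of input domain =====

-- B replaces A's two full sorts (used only to read off the minimum x and minimum y)
-- by one linear scan for the minima; the final sort of the shifted pairs is the same.

-- ===== PORT A =====
def moveToZero (arr : List (Int × Int)) : List (Int × Int) :=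
  let leftArr := PySem.List.sorted arr (fun x => x.1) false
  let topArr := PySem.List.sorted arr (fun x => x.2) false
  let left := (PySem.List.pyGetD leftArr 0 ((0 : Int), (0 : Int))).1
  let top := (PySem.List.pyGetD topArr 0 ((0 : Int), (0 : Int))).2
  let result := arr.foldl (fun acc p => acc ++ [(p.1 - left, p.2 - top)]) []
  PySem.List.sorted2 result (fun x => x.1) (fun x => x.2) false

-- ===== PORT B =====
def moveToZero_alt (arr : List (Int × Int)) : List (Int × Int) :=
  let init := PySem.List.pyGetD arr 0 ((0 : Int), (0 : Int))
  let lt := arr.foldl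
      (fun (s : Int × Int) p =>
        (if p.1 < s.1 then p.1 else s.1, if p.2 < s.2 then p.2 else s.2))
      (init.1, init.2)
  PySem.List.sorted2 (arr.map (fun p => (p.1 - lt.1, p.2 - lt.2)))
    (fun x => x.1) (fun x => x.2) false

-- ===== PRECONDITION & SPEC =====
-- A raises IndexError on the empty list (leftArr[0]); B indexes arr[0] and raises there too.
def Pre_moveToZero (arr : List (Int × Int)) : Prop := arr ≠ []
instance (arr : List (Int × Int)) : Decidable (Pre_moveToZero arr) := by unfold Pre_moveToZero; infer_instance
def pvWitness_moveToZero : (List (Int × Int)) := [((3 : Int), (5 : Int)), (1, 2)]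

def Spec_moveToZero (arr : List (Int × Int)) (out : List (Int × Int)) : Prop := out = moveToZero_alt arr
instance (arr : List (Int × Int)) (out : List (Int × Int)) : Decidable (Spec_moveToZero arr out) := by unfold Spec_moveToZero; infer_instance

-- ===== CLAIM (what is proved, stated in full; the proofs are below) =====
def Claim_equal_moveToZero : Prop := ∀ (arr : List (Int × Int)), Dom_moveToZero arr → Pre_moveToZero arr → Spec_moveToZero arr (moveToZero arr)

-- ===== LEMMAS AND PROOFS =====

-- the running-min step 'if x < s then x else s' is min s x
lemma if_lt_eq_min (s x : Int) : (if x < s then x else s) = min s x := by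
  split_ifs with h <;> omega

-- B's pair fold splits into two independent running mins
lemma foldl_pair_min (arr : List (Int × Int)) (l t : Int) :
    arr.foldl (fun (s : Int × Int) p => (min s.1 p.1, min s.2 p.2)) (l, t)
    = ((arr.map (fun x => x.1)).foldl min l, (arr.map (fun x => x.2)).foldl min t) := by
  induction arr generalizing l t with
  | nil => rfl
  | cons a rest ih =>
      simp only [List.foldl_cons, List.map_cons]
      exact ih _ _

-- the key of the head of sorted(arr, key) equals the running min of the keys seeded at key arr[0]
lemma sorted_head_key_eq_foldl_min (a : Int × Int) (rest : List (Int × Int))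
    (key : Int × Int → Int) :
    key (PySem.List.pyGetD (PySem.List.sorted (a :: rest) key false) 0 ((0 : Int), (0 : Int)))
      = ((a :: rest).map key).foldl min (key a) := by
  -- name the head of the sorted list
  obtain ⟨m, t, hmt⟩ : ∃ m t, PySem.List.sorted (a :: rest) key false = m :: t := by
    rcases hs : PySem.List.sorted (a :: rest) key false with _ | ⟨m, t⟩
    · exact absurd ((PySem.List.sorted_eq_nil_iff _ _ _).mp hs) (by simp)
    · exact ⟨m, t, rfl⟩
  have hmin : ∀ y ∈ (a :: rest), key m ≤ key y :=
    PySem.List.key_head_sorted_le _ key hmt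
  have hm_mem : m ∈ (a :: rest) := by
    have : m ∈ PySem.List.sorted (a :: rest) key false := by rw [hmt]; exact List.mem_cons_self
    exact (PySem.List.mem_sorted _ _ _ _).mp this
  set M := ((a :: rest).map key).foldl min (key a) with hM
  have hle := PySem.List.foldl_min_le ((a :: rest).map key) (key a)
  have hmem := PySem.List.foldl_min_mem ((a :: rest).map key) (key a)
  have hMle : ∀ y ∈ (a :: rest), M ≤ key y := by
    intro y hy
    exact hle.2 (key y) (List.mem_map_of_mem hy)
  have hMmem : ∃ y ∈ (a :: rest), key y = M := by
    rcases hmem with h | h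
    · exact ⟨a, List.mem_cons_self, h.symm⟩
    · rcases List.mem_map.mp h with ⟨y, hy, hky⟩
      exact ⟨y, hy, hky⟩
  rw [hmt, PySem.List.pyGetD_zero_cons]
  rcases hMmem with ⟨y, hy, hky⟩
  have h1 : key m ≤ M := hky ▸ hmin y hy
  have h2 : M ≤ key m := hMle m hm_mem
  omega

-- ===== VERDICT (by name: the statement is the Claim_ definition above) =====
theorem moveToZero_spec : Claim_equal_moveToZero := by
  intro arr _ hpre
  rcases arr with _ | ⟨a, rest⟩
  · exact absurd rfl hpre
  unfold Spec_moveToZero moveToZero moveToZero_alt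
  simp only [PySem.List.pyGetD_zero_cons, if_lt_eq_min, foldl_pair_min]
  rw [sorted_head_key_eq_foldl_min a rest (fun x => x.1),
      sorted_head_key_eq_foldl_min a rest (fun x => x.2)]
  simp only [PySem.List.foldl_append_singleton_eq_map, List.nil_append]
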